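-- pv_equiv track=rewrite | github.com/gauribaraskar/Wavelet-tree | InputGenerator.py | generate_Fibonacci_string
-- ===== SOURCE A (Python) =====
-- def generate_Fibonacci_string(n):
--     s = ""
--     for i in range(1,n+1):
--         if i == 1:
--             prev = "a"
--             s =  "a"
--         elif i == 2:
--             curr = "bc"
--             s = "bc"
--         else:
--             s = prev + curr
--             prev = curr
--             curr = s
--     return s
-- ===== SOURCE B (Python) =====
-- def generate_Fibonacci_string(n):
--     if n <= 0:
--         return ""
--     if n == 1:
--         return "a"
--
--     def pair(k):
--         # returns (f(k-1), f(k)) for k >= 2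
--         if k == 2:
--             return ("a", "bc")
--         p, c = pair(k - 1)
--         return (c, p + c)
--
--     return pair(n)[1]
-- ===== Notes on version B (the rewrite author's own statement) =====
-- stated objective: alternative
-- what changed: Replaces A's iterative prev/curr loop accumulation with a recursive helper computing the pair (f(k-1), f(k)) from the Fibonacci-word recurrence f(k)=f(k-2)+f(k-1).
import Mathlib
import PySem

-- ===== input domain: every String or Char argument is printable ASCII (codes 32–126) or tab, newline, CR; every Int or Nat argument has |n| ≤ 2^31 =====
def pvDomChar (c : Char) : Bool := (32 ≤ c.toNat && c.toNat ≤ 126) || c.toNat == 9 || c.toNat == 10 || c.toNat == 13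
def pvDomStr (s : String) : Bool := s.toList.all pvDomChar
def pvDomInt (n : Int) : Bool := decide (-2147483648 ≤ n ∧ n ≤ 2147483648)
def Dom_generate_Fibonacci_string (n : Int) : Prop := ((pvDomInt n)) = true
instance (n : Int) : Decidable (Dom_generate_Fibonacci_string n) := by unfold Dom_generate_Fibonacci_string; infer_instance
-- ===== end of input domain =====

-- B replaces A's iterative prev/curr accumulation with a recursive helper returning the
-- pair (f(k-1), f(k)) of the Fibonacci-word recurrence; alternative decomposition, not faster.

-- ===== PORT A =====
-- state (s, prev, curr); the branches mirror A's loop body in order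
def fibStepA (st : String × String × String) (i : Int) : String × String × String :=
  if i = 1 then ("a", "a", st.2.2)
  else if i = 2 then ("bc", st.2.1, "bc")
  else (st.2.1 ++ st.2.2, st.2.2, st.2.1 ++ st.2.2)

def generate_Fibonacci_string (n : Int) : String :=
  ((PySem.List.pyRange 1 (n + 1) 1).foldl fibStepA ("", "", "")).1

-- ===== PORT B =====
-- fibPairB m = Python's pair(m + 2) = (f(m+1), f(m+2))
def fibPairB : Nat → String × String
  | 0 => ("a", "bc")
  | m + 1 => let pc := fibPairB m; (pc.2, pc.1 ++ pc.2)

def generate_Fibonacci_string_alt (n : Int) : String :=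
  if n ≤ 0 then ""
  else if n = 1 then "a"
  else (fibPairB (n.toNat - 2)).2

-- ===== PRECONDITION & SPEC =====
def Spec_generate_Fibonacci_string (n : Int) (out : String) : Prop := out = generate_Fibonacci_string_alt n
instance (n : Int) (out : String) : Decidable (Spec_generate_Fibonacci_string n out) := by unfold Spec_generate_Fibonacci_string; infer_instance

-- ===== CLAIM (what is proved, stated in full; the proofs are below) =====
def Claim_equal_generate_Fibonacci_string : Prop := ∀ (n : Int), Dom_generate_Fibonacci_string n → Spec_generate_Fibonacci_string n (generate_Fibonacci_string n)

-- ===== LEMMAS AND PROOFS =====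

theorem loop_inv (k : Nat) (h : 2 ≤ k) :
    (PySem.List.pyRange 1 ((k : Int) + 1) 1).foldl fibStepA ("", "", "") =
      ((fibPairB (k - 2)).2, (fibPairB (k - 2)).1, (fibPairB (k - 2)).2) := by
  induction k with
  | zero => omega
  | succ k ih =>
    rcases Nat.lt_or_ge k 2 with hk | hk
    · interval_cases k
      · omega
      · have : ((2 : Nat) : Int) + 1 = 3 := by norm_num
        rw [this]
        decide
    · have hsplit : PySem.List.pyRange 1 ((k : Int) + 1 + 1) 1 =
          PySem.List.pyRange 1 ((k : Int) + 1) 1 ++ [(k : Int) + 1] := by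
        have := PySem.List.pyRange_one_succ_right (a := 1) (b := (k : Int) + 1) (by omega)
        simpa using this
      have hcast : ((k + 1 : Nat) : Int) + 1 = (k : Int) + 1 + 1 := by push_cast; ring
      rw [hcast, hsplit, List.foldl_append, ih hk]
      have h1 : ¬ ((k : Int) + 1 = 1) := by omega
      have h2 : ¬ ((k : Int) + 1 = 2) := by omega
      simp only [List.foldl, fibStepA, if_neg h1, if_neg h2]
      obtain ⟨m, rfl⟩ : ∃ m, k = m + 2 := ⟨k - 2, by omega⟩
      simp [fibPairB]

theorem generate_Fibonacci_string_eq (n : Int) :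
    generate_Fibonacci_string n = generate_Fibonacci_string_alt n := by
  unfold generate_Fibonacci_string generate_Fibonacci_string_alt
  by_cases h0 : n ≤ 0
  · rw [PySem.List.pyRange_one_eq_nil (by omega)]
    simp [h0]
  · by_cases h1 : n = 1
    · subst h1; decide
    · have hk : n = ((n.toNat : Nat) : Int) := by omega
      have hk2 : 2 ≤ n.toNat := by omega
      rw [hk, loop_inv n.toNat hk2]
      have hpos : ¬ ((n.toNat : Int) ≤ 0) := by omega
      have hne1 : ¬ ((n.toNat : Int) = 1) := by omega
      simp only [if_neg hpos, if_neg hne1, Int.toNat_natCast]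

-- ===== VERDICT (by name: the statement is the Claim_ definition above) =====
theorem generate_Fibonacci_string_spec : Claim_equal_generate_Fibonacci_string := by
  intro n _
  exact generate_Fibonacci_string_eq n
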